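-- pv_equiv track=rewrite | github.com/dermen/cctbx_project | mmtbx/probe/AtomTypes.py | IsAromaticAcceptor
-- ===== SOURCE A (Python) =====
-- def Unpad(n):
--   # Gobble up all spaces from the end of the name.
--   while n[-1] == ' ':
--     n = n[:-1]
--   return n
--
-- def IsAromaticAcceptor(resName, atomName):
--   """Given a residue and atom name, determine whether that atom is an acceptor as part of an aromatic ring.
--   :param resName: String containing the 1-3-character residue name in all caps, including leading space.
--   :param atomName: String containing the 1-4-character atom name in all caps, including leading space.
--   :returns True if the atom is a C=O in a standard resize, False if not.  Does not handle HET atoms.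
--   """
--
--   # Table of aromatic-acceptor atoms by residue and atom name.  The first entry in each list element is
--   # the residue name.  The second is a list of atoms that qualify.
--   AromaticTable = [
--     # Note: Some atoms from these residues are listed in other sections.  The combination of
--     # reside and atom name is not duplicated, but there are multiple entries for some residues --
--     # this is not a set.
--
--     ['HIS', [' ND1',' NE2'] ],
--
--     ['ADE', [' N1',' N3',' N7',' C2',' C4',' C5',' C6',' C8',' N9'] ],
--     ['  A', [' N1',' N3',' N7',' C2',' C4',' C5',' C6',' C8',' N9'] ],
--     ['A',   [' N1',' N3',' N7',' C2',' C4',' C5',' C6',' C8',' N9'] ],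
--     ['CYT', [' N3',' N1',' C2',' C4',' C5',' C6'] ],
--     ['  C', [' N3',' N1',' C2',' C4',' C5',' C6'] ],
--     ['C',   [' N3',' N1',' C2',' C4',' C5',' C6'] ],
--     ['GUA', [' N3',' N7',' N1',' C2',' C4',' C5',' C6',' C8',' N9'] ],
--     ['  G', [' N3',' N7',' N1',' C2',' C4',' C5',' C6',' C8',' N9'] ],
--     ['G',   [' N3',' N7',' N1',' C2',' C4',' C5',' C6',' C8',' N9'] ],
--     ['THY', [' N1',' C2',' N3',' C4',' C5',' C6'] ],
--     ['  T', [' N1',' C2',' N3',' C4',' C5',' C6'] ],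
--     ['T',   [' N1',' C2',' N3',' C4',' C5',' C6'] ],
--     ['URA', [' N1',' C2',' N3',' C4',' C5',' C6'] ],
--     ['  U', [' N1',' C2',' N3',' C4',' C5',' C6'] ],
--     ['U',   [' N1',' C2',' N3',' C4',' C5',' C6'] ],
--
--     ['DA',  [' N1',' N3',' N7',' C2',' C4',' C5',' C6',' C8',' N9'] ],
--     [' DA',  [' N1',' N3',' N7',' C2',' C4',' C5',' C6',' C8',' N9'] ],
--     ['DC',  [' N3',' N1',' C2',' C4',' C5',' C6'] ],
--     [' DC',  [' N3',' N1',' C2',' C4',' C5',' C6'] ],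
--     ['DG',  [' N3',' N7',' N1',' C2',' C4',' C5',' C6',' C8',' N9'] ],
--     [' DG',  [' N3',' N7',' N1',' C2',' C4',' C5',' C6',' C8',' N9'] ],
--     ['DT',  [' N1',' C2',' N3',' C4',' C5',' C6'] ],
--     [' DT',  [' N1',' C2',' N3',' C4',' C5',' C6'] ],
--
--     ['HEM', [' N A',' N B',' N C',' N D'] ],
--
--     # Here we treat the aromatic Pi-bonds as hydrogen bond acceptors.
--     # Note: Some atoms from these residues are listed in other sections.  The combination of
--     # reside and atom name is not duplicated, but there are multiple entries for some residues --
--     # this is not a set.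
--
--     ['HEM', [' C1A',' C2A',' C3A',' C4A',
--              ' C1B',' C2B',' C3B',' C4B',
--              ' C1C',' C2C',' C3C',' C4C',
--              ' C1D',' C2D',' C3D',' C4D'] ],
--     ['PHE', [' CZ',' CE2',' CE1',' CD2',' CD1',' CG'] ],
--     ['TYR', [' CZ',' CE2',' CE1',' CD2',' CD1',' CG'] ],
--     ['HIS', [' CD2',' CE1',' CG'] ],
--     ['TRP', [' CH2',' CZ3',' CZ2',' CE3',' CE2',' NE1',' CD2',' CD1',' CG'] ]
--   ]
--
--   for e in AromaticTable:
--     if Unpad(resName) == e[0] and Unpad(atomName) in e[1]: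
--       return True
--   return False
-- ===== SOURCE B (Python) =====
-- # B: merge residues sharing the same qualifying atom set into 6 groups, each encoded as a
-- # pair of comma-joined strings; find the group containing the unpadded residue name, then
-- # test the unpadded atom name against that group's atom list -- no scan over 33 table rows.
--
-- _GROUPS = [
--     ('HIS',
--      ' ND1, NE2, CD2, CE1, CG'),
--     ('ADE,  A,A,GUA,  G,G,DA, DA,DG, DG',
--      ' N1, N3, N7, C2, C4, C5, C6, C8, N9'),
--     ('CYT,  C,C,THY,  T,T,URA,  U,U,DC, DC,DT, DT',
--      ' N1, C2, N3, C4, C5, C6'),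
--     ('HEM',
--      ' N A, N B, N C, N D, C1A, C2A, C3A, C4A, C1B, C2B, C3B, C4B, C1C, C2C, C3C, C4C, C1D, C2D, C3D, C4D'),
--     ('PHE,TYR',
--      ' CZ, CE2, CE1, CD2, CD1, CG'),
--     ('TRP',
--      ' CH2, CZ3, CZ2, CE3, CE2, NE1, CD2, CD1, CG'),
-- ]
--
-- def _unpad(n):
--   while n[-1] == ' ':
--     n = n[:-1]
--   return n
--
-- def IsAromaticAcceptor(resName, atomName):
--   res = _unpad(resName)
--   for residues, atoms in _GROUPS:
--     if res in residues.split(','):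
--       return _unpad(atomName) in atoms.split(',')
--   return False
-- ===== Notes on version B (the rewrite author's own statement) =====
-- stated objective: simpler
-- what changed: Merges residues that share the same qualifying atom set into 6 groups encoded as comma-joined strings; the lookup finds the single group containing the unpadded residue name and tests the unpadded atom name against that group's atom list, instead of A's scan over the 33-row residue-by-residue table; Pre_ excludes only inputs where A raises IndexError inside Unpad (resName all spaces/empty, or atomName all spaces/empty while the unpadded residue is in the table), where B raises identically.
import Mathlib
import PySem

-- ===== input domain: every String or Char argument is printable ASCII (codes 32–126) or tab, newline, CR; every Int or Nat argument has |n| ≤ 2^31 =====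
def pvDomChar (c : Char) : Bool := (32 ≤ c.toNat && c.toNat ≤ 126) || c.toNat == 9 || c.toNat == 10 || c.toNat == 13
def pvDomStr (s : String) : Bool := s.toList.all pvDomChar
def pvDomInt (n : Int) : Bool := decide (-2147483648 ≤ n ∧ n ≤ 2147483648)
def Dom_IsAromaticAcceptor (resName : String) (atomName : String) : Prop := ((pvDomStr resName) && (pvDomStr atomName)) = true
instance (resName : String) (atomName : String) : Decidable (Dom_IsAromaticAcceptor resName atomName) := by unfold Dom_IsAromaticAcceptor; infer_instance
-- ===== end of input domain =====

set_option maxRecDepth 40000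

-- B merges residues sharing the same qualifying atom set into 6 groups (comma-joined
-- strings, split at call time) and answers by finding the residue's group and testing the
-- atom there, instead of A's scan over the 33-row table; Pre_ excludes exactly the inputs
-- where Python A raises (Unpad's IndexError).

-- Unpad helper (shared source in Source A/Source B): while n[-1] == ' ': n = n[:-1]
-- (total here; Python raises IndexError when no non-space character exists — excluded by Pre_)
def pvUnpadRev : List Char → List Char
  | [] => []
  | c :: rest => if c == ' ' then pvUnpadRev rest else c :: rest

def pvUnpad (n : String) : String := String.ofList (pvUnpadRev n.toList.reverse).reverse

-- ===== PORT A =====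
def pvAromaticTable : List (String × List String) := [
  ("HIS", [" ND1"," NE2"]),
  ("ADE", [" N1"," N3"," N7"," C2"," C4"," C5"," C6"," C8"," N9"]),
  ("  A", [" N1"," N3"," N7"," C2"," C4"," C5"," C6"," C8"," N9"]),
  ("A",   [" N1"," N3"," N7"," C2"," C4"," C5"," C6"," C8"," N9"]),
  ("CYT", [" N3"," N1"," C2"," C4"," C5"," C6"]),
  ("  C", [" N3"," N1"," C2"," C4"," C5"," C6"]),
  ("C",   [" N3"," N1"," C2"," C4"," C5"," C6"]),
  ("GUA", [" N3"," N7"," N1"," C2"," C4"," C5"," C6"," C8"," N9"]),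
  ("  G", [" N3"," N7"," N1"," C2"," C4"," C5"," C6"," C8"," N9"]),
  ("G",   [" N3"," N7"," N1"," C2"," C4"," C5"," C6"," C8"," N9"]),
  ("THY", [" N1"," C2"," N3"," C4"," C5"," C6"]),
  ("  T", [" N1"," C2"," N3"," C4"," C5"," C6"]),
  ("T",   [" N1"," C2"," N3"," C4"," C5"," C6"]),
  ("URA", [" N1"," C2"," N3"," C4"," C5"," C6"]),
  ("  U", [" N1"," C2"," N3"," C4"," C5"," C6"]),
  ("U",   [" N1"," C2"," N3"," C4"," C5"," C6"]),
  ("DA",  [" N1"," N3"," N7"," C2"," C4"," C5"," C6"," C8"," N9"]),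
  (" DA", [" N1"," N3"," N7"," C2"," C4"," C5"," C6"," C8"," N9"]),
  ("DC",  [" N3"," N1"," C2"," C4"," C5"," C6"]),
  (" DC", [" N3"," N1"," C2"," C4"," C5"," C6"]),
  ("DG",  [" N3"," N7"," N1"," C2"," C4"," C5"," C6"," C8"," N9"]),
  (" DG", [" N3"," N7"," N1"," C2"," C4"," C5"," C6"," C8"," N9"]),
  ("DT",  [" N1"," C2"," N3"," C4"," C5"," C6"]),
  (" DT", [" N1"," C2"," N3"," C4"," C5"," C6"]),
  ("HEM", [" N A"," N B"," N C"," N D"]),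
  ("HEM", [" C1A"," C2A"," C3A"," C4A",
           " C1B"," C2B"," C3B"," C4B",
           " C1C"," C2C"," C3C"," C4C",
           " C1D"," C2D"," C3D"," C4D"]),
  ("PHE", [" CZ"," CE2"," CE1"," CD2"," CD1"," CG"]),
  ("TYR", [" CZ"," CE2"," CE1"," CD2"," CD1"," CG"]),
  ("HIS", [" CD2"," CE1"," CG"]),
  ("TRP", [" CH2"," CZ3"," CZ2"," CE3"," CE2"," NE1"," CD2"," CD1"," CG"])
]

-- for e in AromaticTable: if Unpad(resName) == e[0] and Unpad(atomName) in e[1]: return True / return False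
def pvScanA : List (String × List String) → String → String → Bool
  | [], _, _ => false
  | e :: rest, resName, atomName =>
      if pvUnpad resName == e.1 && e.2.contains (pvUnpad atomName) then true
      else pvScanA rest resName atomName

def IsAromaticAcceptor (resName : String) (atomName : String) : Bool :=
  pvScanA pvAromaticTable resName atomName

-- ===== PORT B =====
-- s.split(',') — exact for the nonempty separator ',' (PySem.Chars.splitOn is the sep ≠ "" form)
def pvSplit (s : String) : List String := (PySem.Chars.splitOn s.toList [',']).map String.ofList

-- _GROUPS from Source B: (comma-joined residue names, comma-joined atom names)
def pvGroups : List (String × String) := [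
  ("HIS",
   " ND1, NE2, CD2, CE1, CG"),
  ("ADE,  A,A,GUA,  G,G,DA, DA,DG, DG",
   " N1, N3, N7, C2, C4, C5, C6, C8, N9"),
  ("CYT,  C,C,THY,  T,T,URA,  U,U,DC, DC,DT, DT",
   " N1, C2, N3, C4, C5, C6"),
  ("HEM",
   " N A, N B, N C, N D, C1A, C2A, C3A, C4A, C1B, C2B, C3B, C4B, C1C, C2C, C3C, C4C, C1D, C2D, C3D, C4D"),
  ("PHE,TYR",
   " CZ, CE2, CE1, CD2, CD1, CG"),
  ("TRP",
   " CH2, CZ3, CZ2, CE3, CE2, NE1, CD2, CD1, CG")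
]

-- for residues, atoms in _GROUPS: if res in residues.split(','): return Unpad(atomName) in atoms.split(',')
def pvFindGroup : List (String × String) → String → Option String
  | [], _ => none
  | g :: rest, res =>
      if (pvSplit g.1).contains res then some g.2
      else pvFindGroup rest res

def IsAromaticAcceptor_alt (resName : String) (atomName : String) : Bool :=
  match pvFindGroup pvGroups (pvUnpad resName) with
  | none => false
  | some atoms => (pvSplit atoms).contains (pvUnpad atomName)

-- ===== PRECONDITION & SPEC =====
-- Pre_ excludes exactly the inputs on which Python A raises IndexError inside Unpad:
-- resName with no non-space character, or atomName with no non-space character when the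
-- unpadded residue name occurs in the table (only then is Unpad(atomName) evaluated).
def Pre_IsAromaticAcceptor (resName : String) (atomName : String) : Prop :=
  resName.toList.any (fun c => c ≠ ' ') = true ∧
  (pvUnpad resName ∈ pvAromaticTable.map Prod.fst →
    atomName.toList.any (fun c => c ≠ ' ') = true)
instance (resName : String) (atomName : String) : Decidable (Pre_IsAromaticAcceptor resName atomName) := by
  unfold Pre_IsAromaticAcceptor; infer_instance

def pvWitness_IsAromaticAcceptor : String × String := ("HIS", " ND1")

def Spec_IsAromaticAcceptor (resName : String) (atomName : String) (out : Bool) : Prop := out = IsAromaticAcceptor_alt resName atomName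
instance (resName : String) (atomName : String) (out : Bool) : Decidable (Spec_IsAromaticAcceptor resName atomName out) := by unfold Spec_IsAromaticAcceptor; infer_instance

-- ===== CLAIM (what is proved, stated in full; the proofs are below) =====
def Claim_equal_IsAromaticAcceptor : Prop := ∀ (resName : String) (atomName : String), Dom_IsAromaticAcceptor resName atomName → Pre_IsAromaticAcceptor resName atomName → Spec_IsAromaticAcceptor resName atomName (IsAromaticAcceptor resName atomName)

-- ===== LEMMAS AND PROOFS =====

-- the (residue, atom) pairs a row table accepts
def pvPairs (t : List (String × List String)) : List (String × String) :=
  t.flatMap (fun e => e.2.map (fun x => (e.1, x)))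

-- the (residue, atom) pairs a group table accepts
def pvGPairs (gs : List (String × String)) : List (String × String) :=
  gs.flatMap (fun g =>
    (pvSplit g.1).flatMap (fun res =>
      (pvSplit g.2).map (fun x => (res, x))))

-- groups have pairwise-disjoint residue lists
def pvResDisjoint : List (String × String) → Bool
  | [] => true
  | g :: rest =>
      ((pvSplit g.1).all
        (fun r => rest.all (fun g' => !(pvSplit g'.1).contains r)))
      && pvResDisjoint rest

theorem pvScanA_eq_pairs (t : List (String × List String)) (rn an : String) :
    pvScanA t rn an = (pvPairs t).contains (pvUnpad rn, pvUnpad an) := by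
  induction t with
  | nil => simp [pvScanA, pvPairs]
  | cons e rest ih =>
      show (if pvUnpad rn == e.1 && e.2.contains (pvUnpad an) then true
            else pvScanA rest rn an) = _
      rw [ih]
      simp only [pvPairs, List.flatMap_cons]
      rw [Bool.eq_iff_iff]
      by_cases h : pvUnpad rn = e.1 ∧ pvUnpad an ∈ e.2 <;>
        simp_all [List.mem_map, Prod.ext_iff] <;> tauto

theorem pvGPairs_mem_res {gs : List (String × String)} {r a : String}
    (h : (r, a) ∈ pvGPairs gs) :
    ∃ g ∈ gs, r ∈ pvSplit g.1 := by
  simp only [pvGPairs, List.mem_flatMap, List.mem_map, Prod.ext_iff] at h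
  obtain ⟨g, hg, res, hres, x, hx, hrx⟩ := h
  exact ⟨g, hg, hrx.1 ▸ hres⟩

theorem pvFind_eq_gpairs (gs : List (String × String)) (r a : String)
    (hdisj : pvResDisjoint gs = true) :
    (match pvFindGroup gs r with
     | none => false
     | some atoms => (pvSplit atoms).contains a)
      = (pvGPairs gs).contains (r, a) := by
  induction gs with
  | nil => simp [pvFindGroup, pvGPairs]
  | cons g rest ih =>
      have hdj : ((pvSplit g.1).all
          (fun r => rest.all (fun g' => !(pvSplit g'.1).contains r))) = true ∧
          pvResDisjoint rest = true := by
        simpa [pvResDisjoint, Bool.and_eq_true] using hdisj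
      show (match (if (pvSplit g.1).contains r then some g.2
                   else pvFindGroup rest r) with
            | none => false
            | some atoms => (pvSplit atoms).contains a) = _
      by_cases hr : r ∈ pvSplit g.1
      · have hrc : (pvSplit g.1).contains r = true := by
          simpa using hr
        rw [hrc]
        simp only [if_true]
        -- rest's pairs cannot contain (r, a): residues are disjoint
        have hnot : (r, a) ∉ pvGPairs rest := by
          intro hmem
          obtain ⟨g', hg', hr'⟩ := pvGPairs_mem_res hmem
          have := (List.all_eq_true.mp hdj.1) r hr
          have := (List.all_eq_true.mp this) g' hg'
          simp at this
          exact this (by simpa using hr')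
        simp only [pvGPairs, List.flatMap_cons]
        rw [Bool.eq_iff_iff]
        constructor
        · intro ha
          simp only [List.contains_eq_mem, decide_eq_true_eq, List.mem_append]
          left
          simp only [List.mem_flatMap, List.mem_map]
          exact ⟨r, hr, by simpa using ha⟩
        · intro hmem
          simp only [List.contains_eq_mem, decide_eq_true_eq, List.mem_append] at hmem
          rcases hmem with hmem | hmem
          · simp only [List.mem_flatMap, List.mem_map, Prod.ext_iff] at hmem
            obtain ⟨res, _, x, hx, hxr⟩ := hmem
            simpa [← hxr.2] using hx
          · exact absurd hmem (by simpa [pvGPairs] using hnot)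
      · have hrc : (pvSplit g.1).contains r = false := by
          simpa using hr
        rw [hrc]
        simp only [Bool.false_eq_true, if_false]
        rw [ih hdj.2]
        simp only [pvGPairs, List.flatMap_cons]
        rw [Bool.eq_iff_iff]
        constructor
        · intro h; simp only [List.contains_eq_mem, decide_eq_true_eq,
            List.mem_append] at h ⊢
          right; exact h
        · intro h
          simp only [List.contains_eq_mem, decide_eq_true_eq, List.mem_append] at h ⊢
          rcases h with h | h
          · simp only [List.mem_flatMap, List.mem_map, Prod.ext_iff] at h
            obtain ⟨res, hres, x, _, hxr⟩ := h
            exact absurd (hxr.1 ▸ hres) hr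
          · exact h

-- literal evaluations of the two pair lists, and their equality as multisets via sorting
def pvPairsLit : List (String × String) := [("HIS", " ND1"),
  ("HIS", " NE2"),
  ("ADE", " N1"),
  ("ADE", " N3"),
  ("ADE", " N7"),
  ("ADE", " C2"),
  ("ADE", " C4"),
  ("ADE", " C5"),
  ("ADE", " C6"),
  ("ADE", " C8"),
  ("ADE", " N9"),
  ("  A", " N1"),
  ("  A", " N3"),
  ("  A", " N7"),
  ("  A", " C2"),
  ("  A", " C4"),
  ("  A", " C5"),
  ("  A", " C6"),
  ("  A", " C8"),
  ("  A", " N9"),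
  ("A", " N1"),
  ("A", " N3"),
  ("A", " N7"),
  ("A", " C2"),
  ("A", " C4"),
  ("A", " C5"),
  ("A", " C6"),
  ("A", " C8"),
  ("A", " N9"),
  ("CYT", " N3"),
  ("CYT", " N1"),
  ("CYT", " C2"),
  ("CYT", " C4"),
  ("CYT", " C5"),
  ("CYT", " C6"),
  ("  C", " N3"),
  ("  C", " N1"),
  ("  C", " C2"),
  ("  C", " C4"),
  ("  C", " C5"),
  ("  C", " C6"),
  ("C", " N3"),
  ("C", " N1"),
  ("C", " C2"),
  ("C", " C4"),
  ("C", " C5"),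
  ("C", " C6"),
  ("GUA", " N3"),
  ("GUA", " N7"),
  ("GUA", " N1"),
  ("GUA", " C2"),
  ("GUA", " C4"),
  ("GUA", " C5"),
  ("GUA", " C6"),
  ("GUA", " C8"),
  ("GUA", " N9"),
  ("  G", " N3"),
  ("  G", " N7"),
  ("  G", " N1"),
  ("  G", " C2"),
  ("  G", " C4"),
  ("  G", " C5"),
  ("  G", " C6"),
  ("  G", " C8"),
  ("  G", " N9"),
  ("G", " N3"),
  ("G", " N7"),
  ("G", " N1"),
  ("G", " C2"),
  ("G", " C4"),
  ("G", " C5"),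
  ("G", " C6"),
  ("G", " C8"),
  ("G", " N9"),
  ("THY", " N1"),
  ("THY", " C2"),
  ("THY", " N3"),
  ("THY", " C4"),
  ("THY", " C5"),
  ("THY", " C6"),
  ("  T", " N1"),
  ("  T", " C2"),
  ("  T", " N3"),
  ("  T", " C4"),
  ("  T", " C5"),
  ("  T", " C6"),
  ("T", " N1"),
  ("T", " C2"),
  ("T", " N3"),
  ("T", " C4"),
  ("T", " C5"),
  ("T", " C6"),
  ("URA", " N1"),
  ("URA", " C2"),
  ("URA", " N3"),
  ("URA", " C4"),
  ("URA", " C5"),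
  ("URA", " C6"),
  ("  U", " N1"),
  ("  U", " C2"),
  ("  U", " N3"),
  ("  U", " C4"),
  ("  U", " C5"),
  ("  U", " C6"),
  ("U", " N1"),
  ("U", " C2"),
  ("U", " N3"),
  ("U", " C4"),
  ("U", " C5"),
  ("U", " C6"),
  ("DA", " N1"),
  ("DA", " N3"),
  ("DA", " N7"),
  ("DA", " C2"),
  ("DA", " C4"),
  ("DA", " C5"),
  ("DA", " C6"),
  ("DA", " C8"),
  ("DA", " N9"),
  (" DA", " N1"),
  (" DA", " N3"),
  (" DA", " N7"),
  (" DA", " C2"),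
  (" DA", " C4"),
  (" DA", " C5"),
  (" DA", " C6"),
  (" DA", " C8"),
  (" DA", " N9"),
  ("DC", " N3"),
  ("DC", " N1"),
  ("DC", " C2"),
  ("DC", " C4"),
  ("DC", " C5"),
  ("DC", " C6"),
  (" DC", " N3"),
  (" DC", " N1"),
  (" DC", " C2"),
  (" DC", " C4"),
  (" DC", " C5"),
  (" DC", " C6"),
  ("DG", " N3"),
  ("DG", " N7"),
  ("DG", " N1"),
  ("DG", " C2"),
  ("DG", " C4"),
  ("DG", " C5"),
  ("DG", " C6"),
  ("DG", " C8"),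
  ("DG", " N9"),
  (" DG", " N3"),
  (" DG", " N7"),
  (" DG", " N1"),
  (" DG", " C2"),
  (" DG", " C4"),
  (" DG", " C5"),
  (" DG", " C6"),
  (" DG", " C8"),
  (" DG", " N9"),
  ("DT", " N1"),
  ("DT", " C2"),
  ("DT", " N3"),
  ("DT", " C4"),
  ("DT", " C5"),
  ("DT", " C6"),
  (" DT", " N1"),
  (" DT", " C2"),
  (" DT", " N3"),
  (" DT", " C4"),
  (" DT", " C5"),
  (" DT", " C6"),
  ("HEM", " N A"),
  ("HEM", " N B"),
  ("HEM", " N C"),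
  ("HEM", " N D"),
  ("HEM", " C1A"),
  ("HEM", " C2A"),
  ("HEM", " C3A"),
  ("HEM", " C4A"),
  ("HEM", " C1B"),
  ("HEM", " C2B"),
  ("HEM", " C3B"),
  ("HEM", " C4B"),
  ("HEM", " C1C"),
  ("HEM", " C2C"),
  ("HEM", " C3C"),
  ("HEM", " C4C"),
  ("HEM", " C1D"),
  ("HEM", " C2D"),
  ("HEM", " C3D"),
  ("HEM", " C4D"),
  ("PHE", " CZ"),
  ("PHE", " CE2"),
  ("PHE", " CE1"),
  ("PHE", " CD2"),
  ("PHE", " CD1"),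
  ("PHE", " CG"),
  ("TYR", " CZ"),
  ("TYR", " CE2"),
  ("TYR", " CE1"),
  ("TYR", " CD2"),
  ("TYR", " CD1"),
  ("TYR", " CG"),
  ("HIS", " CD2"),
  ("HIS", " CE1"),
  ("HIS", " CG"),
  ("TRP", " CH2"),
  ("TRP", " CZ3"),
  ("TRP", " CZ2"),
  ("TRP", " CE3"),
  ("TRP", " CE2"),
  ("TRP", " NE1"),
  ("TRP", " CD2"),
  ("TRP", " CD1"),
  ("TRP", " CG")]

def pvGPairsLit : List (String × String) := [("HIS", " ND1"),
  ("HIS", " NE2"),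
  ("HIS", " CD2"),
  ("HIS", " CE1"),
  ("HIS", " CG"),
  ("ADE", " N1"),
  ("ADE", " N3"),
  ("ADE", " N7"),
  ("ADE", " C2"),
  ("ADE", " C4"),
  ("ADE", " C5"),
  ("ADE", " C6"),
  ("ADE", " C8"),
  ("ADE", " N9"),
  ("  A", " N1"),
  ("  A", " N3"),
  ("  A", " N7"),
  ("  A", " C2"),
  ("  A", " C4"),
  ("  A", " C5"),
  ("  A", " C6"),
  ("  A", " C8"),
  ("  A", " N9"),
  ("A", " N1"),
  ("A", " N3"),
  ("A", " N7"),
  ("A", " C2"),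
  ("A", " C4"),
  ("A", " C5"),
  ("A", " C6"),
  ("A", " C8"),
  ("A", " N9"),
  ("GUA", " N1"),
  ("GUA", " N3"),
  ("GUA", " N7"),
  ("GUA", " C2"),
  ("GUA", " C4"),
  ("GUA", " C5"),
  ("GUA", " C6"),
  ("GUA", " C8"),
  ("GUA", " N9"),
  ("  G", " N1"),
  ("  G", " N3"),
  ("  G", " N7"),
  ("  G", " C2"),
  ("  G", " C4"),
  ("  G", " C5"),
  ("  G", " C6"),
  ("  G", " C8"),
  ("  G", " N9"),
  ("G", " N1"),
  ("G", " N3"),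
  ("G", " N7"),
  ("G", " C2"),
  ("G", " C4"),
  ("G", " C5"),
  ("G", " C6"),
  ("G", " C8"),
  ("G", " N9"),
  ("DA", " N1"),
  ("DA", " N3"),
  ("DA", " N7"),
  ("DA", " C2"),
  ("DA", " C4"),
  ("DA", " C5"),
  ("DA", " C6"),
  ("DA", " C8"),
  ("DA", " N9"),
  (" DA", " N1"),
  (" DA", " N3"),
  (" DA", " N7"),
  (" DA", " C2"),
  (" DA", " C4"),
  (" DA", " C5"),
  (" DA", " C6"),
  (" DA", " C8"),
  (" DA", " N9"),
  ("DG", " N1"),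
  ("DG", " N3"),
  ("DG", " N7"),
  ("DG", " C2"),
  ("DG", " C4"),
  ("DG", " C5"),
  ("DG", " C6"),
  ("DG", " C8"),
  ("DG", " N9"),
  (" DG", " N1"),
  (" DG", " N3"),
  (" DG", " N7"),
  (" DG", " C2"),
  (" DG", " C4"),
  (" DG", " C5"),
  (" DG", " C6"),
  (" DG", " C8"),
  (" DG", " N9"),
  ("CYT", " N1"),
  ("CYT", " C2"),
  ("CYT", " N3"),
  ("CYT", " C4"),
  ("CYT", " C5"),
  ("CYT", " C6"),
  ("  C", " N1"),
  ("  C", " C2"),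
  ("  C", " N3"),
  ("  C", " C4"),
  ("  C", " C5"),
  ("  C", " C6"),
  ("C", " N1"),
  ("C", " C2"),
  ("C", " N3"),
  ("C", " C4"),
  ("C", " C5"),
  ("C", " C6"),
  ("THY", " N1"),
  ("THY", " C2"),
  ("THY", " N3"),
  ("THY", " C4"),
  ("THY", " C5"),
  ("THY", " C6"),
  ("  T", " N1"),
  ("  T", " C2"),
  ("  T", " N3"),
  ("  T", " C4"),
  ("  T", " C5"),
  ("  T", " C6"),
  ("T", " N1"),
  ("T", " C2"),
  ("T", " N3"),
  ("T", " C4"),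
  ("T", " C5"),
  ("T", " C6"),
  ("URA", " N1"),
  ("URA", " C2"),
  ("URA", " N3"),
  ("URA", " C4"),
  ("URA", " C5"),
  ("URA", " C6"),
  ("  U", " N1"),
  ("  U", " C2"),
  ("  U", " N3"),
  ("  U", " C4"),
  ("  U", " C5"),
  ("  U", " C6"),
  ("U", " N1"),
  ("U", " C2"),
  ("U", " N3"),
  ("U", " C4"),
  ("U", " C5"),
  ("U", " C6"),
  ("DC", " N1"),
  ("DC", " C2"),
  ("DC", " N3"),
  ("DC", " C4"),
  ("DC", " C5"),
  ("DC", " C6"),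
  (" DC", " N1"),
  (" DC", " C2"),
  (" DC", " N3"),
  (" DC", " C4"),
  (" DC", " C5"),
  (" DC", " C6"),
  ("DT", " N1"),
  ("DT", " C2"),
  ("DT", " N3"),
  ("DT", " C4"),
  ("DT", " C5"),
  ("DT", " C6"),
  (" DT", " N1"),
  (" DT", " C2"),
  (" DT", " N3"),
  (" DT", " C4"),
  (" DT", " C5"),
  (" DT", " C6"),
  ("HEM", " N A"),
  ("HEM", " N B"),
  ("HEM", " N C"),
  ("HEM", " N D"),
  ("HEM", " C1A"),
  ("HEM", " C2A"),
  ("HEM", " C3A"),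
  ("HEM", " C4A"),
  ("HEM", " C1B"),
  ("HEM", " C2B"),
  ("HEM", " C3B"),
  ("HEM", " C4B"),
  ("HEM", " C1C"),
  ("HEM", " C2C"),
  ("HEM", " C3C"),
  ("HEM", " C4C"),
  ("HEM", " C1D"),
  ("HEM", " C2D"),
  ("HEM", " C3D"),
  ("HEM", " C4D"),
  ("PHE", " CZ"),
  ("PHE", " CE2"),
  ("PHE", " CE1"),
  ("PHE", " CD2"),
  ("PHE", " CD1"),
  ("PHE", " CG"),
  ("TYR", " CZ"),
  ("TYR", " CE2"),
  ("TYR", " CE1"),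
  ("TYR", " CD2"),
  ("TYR", " CD1"),
  ("TYR", " CG"),
  ("TRP", " CH2"),
  ("TRP", " CZ3"),
  ("TRP", " CZ2"),
  ("TRP", " CE3"),
  ("TRP", " CE2"),
  ("TRP", " NE1"),
  ("TRP", " CD2"),
  ("TRP", " CD1"),
  ("TRP", " CG")]

def pvPairLe (p q : String × String) : Bool :=
  PySem.Chars.strLt p.1.toList q.1.toList ||
    (p.1.toList == q.1.toList && !PySem.Chars.strLt q.2.toList p.2.toList)

set_option maxRecDepth 40000 in
theorem pvPairs_eval : pvPairs pvAromaticTable = pvPairsLit := by decide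

set_option maxRecDepth 40000 in
theorem pvGPairs_eval : pvGPairs pvGroups = pvGPairsLit := by decide

def pvIns (p : String × String) : List (String × String) → List (String × String)
  | [] => [p]
  | q :: qs => if pvPairLe p q then p :: q :: qs else q :: pvIns p qs

def pvInsSort : List (String × String) → List (String × String)
  | [] => []
  | p :: rest => pvIns p (pvInsSort rest)

theorem pvIns_perm (p : String × String) (l : List (String × String)) :
    (pvIns p l).Perm (p :: l) := by
  induction l with
  | nil => rfl
  | cons q qs ih =>
      show (if pvPairLe p q then p :: q :: qs else q :: pvIns p qs).Perm _
      split_ifs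
      · exact List.Perm.refl _
      · exact (ih.cons q).trans (List.Perm.swap p q qs)

theorem pvInsSort_perm (l : List (String × String)) : (pvInsSort l).Perm l := by
  induction l with
  | nil => rfl
  | cons p rest ih => exact (pvIns_perm p (pvInsSort rest)).trans (ih.cons p)

set_option maxRecDepth 40000 in
theorem pv_sorted_eq : pvInsSort pvPairsLit = pvInsSort pvGPairsLit := by decide

set_option maxHeartbeats 1000000 in
theorem pv_perm : pvPairsLit.Perm pvGPairsLit := by
  have h1 := pvInsSort_perm pvPairsLit
  have h2 := pvInsSort_perm pvGPairsLit
  rw [pv_sorted_eq] at h1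
  exact h1.symm.trans h2

theorem pv_contains_eq (p : String × String) :
    pvPairsLit.contains p = pvGPairsLit.contains p := by
  rw [Bool.eq_iff_iff]
  simp only [List.contains_eq_mem, decide_eq_true_eq]
  exact pv_perm.mem_iff

-- ===== VERDICT (by name: the statement is the Claim_ definition above) =====
theorem IsAromaticAcceptor_spec : Claim_equal_IsAromaticAcceptor := by
  intro resName atomName _ _
  unfold Spec_IsAromaticAcceptor IsAromaticAcceptor IsAromaticAcceptor_alt
  rw [pvScanA_eq_pairs, pvFind_eq_gpairs _ _ _ (by decide), pvPairs_eval, pvGPairs_eval]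
  exact pv_contains_eq _
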